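-- pv_equiv track=rewrite | github.com/ethan-haynes/coding-problems | python/src/longest_palindrome_substring.py | lps2
-- ===== SOURCE A (Python) =====
-- def lps2(s):
--     n = len(s)
--     m = [[ 0 for i in range(n) ] for i in range(n) ]
--     for i in range(n//2):
--         for j in range(i+1,n+1):
--             sub = s[i:j]
--             if sub == sub[::-1]:
--                 m[i][j-1] = len(sub)
--     return m
-- ===== SOURCE B (Python) =====
-- def lps2(s):
--     # O(n^2) palindrome DP: pal(i,j) iff s[i]==s[j] and inner substring is one,
--     # computed row by row from the bottom; rows i >= n//2 are all zeros as in the spec.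
--     n = len(s)
--     half = n // 2
--     out = []
--     prev = [False] * n          # palindromicity row for index i+1
--     for i in range(n - 1, -1, -1):
--         cur = [s[i] == s[j] and (j - i < 2 or prev[j - 1]) if i <= j else False
--                for j in range(n)]
--         row = ([j - i + 1 if cur[j] else 0 for j in range(n)]
--                if i < half else [0] * n)
--         out.insert(0, row)
--         prev = cur
--     return out
-- ===== Notes on version B (the rewrite author's own statement) =====
-- stated objective: faster
-- what changed: A tests every substring s[i:j] by building it and comparing with its reverse (O(n^3)); B computes palindromicity with the O(n^2) dynamic programme pal(i,j) = (s[i]==s[j] and pal(i+1,j-1)), sweeping rows bottom-up and keeping only the previous row.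
import Mathlib
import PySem

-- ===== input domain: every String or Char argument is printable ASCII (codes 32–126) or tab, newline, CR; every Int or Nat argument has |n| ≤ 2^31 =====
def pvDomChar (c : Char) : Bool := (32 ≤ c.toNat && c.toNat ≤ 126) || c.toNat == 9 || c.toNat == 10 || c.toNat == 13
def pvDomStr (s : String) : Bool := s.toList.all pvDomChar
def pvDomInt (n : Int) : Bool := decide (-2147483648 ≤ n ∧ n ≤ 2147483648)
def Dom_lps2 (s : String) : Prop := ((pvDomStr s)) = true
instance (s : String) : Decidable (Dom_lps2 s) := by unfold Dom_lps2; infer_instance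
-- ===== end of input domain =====

-- B replaces A's cubic slice-and-reverse scan by the quadratic palindrome DP
-- pal(i,j) ↔ s[i]=s[j] ∧ pal(i+1,j-1), computed bottom-up one row at a time.

-- ===== PORT A =====
-- Python list assignment xs[i] = v (a negative index would wrap as in Python;
-- every index reached here is nonnegative and in range)
def pySet {α : Type} (xs : List α) (i : Int) (v : α) : List α :=
  if i < 0 then xs.set (xs.length - (-i).toNat) v else xs.set i.toNat v

def lps2 (s : String) : List (List Int) :=
  let cs := s.toList
  let n : Int := PySem.Chars.len cs
  let m0 : List (List Int) := (PySem.List.pyRange 0 n 1).map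
    (fun _ => (PySem.List.pyRange 0 n 1).map (fun _ => (0:Int)))
  (PySem.List.pyRange 0 (PySem.Int.floordiv n 2) 1).foldl (fun m i =>
    (PySem.List.pyRange (i+1) (n+1) 1).foldl (fun m j =>
      let sub := PySem.List.slice cs (some i) (some j)
      if sub == (PySem.List.slice? sub none none (-1)).getD [] then
        pySet m i (pySet (PySem.List.pyGetD m i []) (j-1) ((PySem.Chars.len sub : Int)))
      else m) m) m0

-- ===== PORT B =====
def lps2_alt (s : String) : List (List Int) :=
  let cs := s.toList
  let n : Int := PySem.Chars.len cs
  let half := PySem.Int.floordiv n 2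
  let res := (PySem.List.pyRange (n-1) (-1) (-1)).foldl
    (fun (st : List Bool × List (List Int)) i =>
      let prev := st.1
      let cur := (PySem.List.pyRange 0 n 1).map (fun j =>
        if i ≤ j then
          (PySem.List.pyGet? cs i == PySem.List.pyGet? cs j)
            && (decide (j - i < 2) || PySem.List.pyGetD prev (j-1) false)
        else false)
      let row := if i < half then
          (PySem.List.pyRange 0 n 1).map (fun j =>
            if PySem.List.pyGetD cur j false then j - i + 1 else 0)
        else (PySem.List.pyRange 0 n 1).map (fun _ => (0:Int))
      (cur, row :: st.2))
    ((PySem.List.pyRange 0 n 1).map (fun _ => false), [])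
  res.2

-- ===== PRECONDITION & SPEC =====
def Spec_lps2 (s : String) (out : List (List Int)) : Prop := out = lps2_alt s
instance (s : String) (out : List (List Int)) : Decidable (Spec_lps2 s out) := by unfold Spec_lps2; infer_instance

-- ===== CLAIM (what is proved, stated in full; the proofs are below) =====
def Claim_equal_lps2 : Prop := ∀ (s : String), Dom_lps2 s → Spec_lps2 s (lps2 s)

-- ===== LEMMAS AND PROOFS =====

-- the DP palindromicity predicate for cs[i..j] (inclusive bounds)
def palSpec (cs : List Char) (i j : Nat) : Bool :=
  if _ : j < i then false
  else if _ : j - i < 2 then cs[i]? == cs[j]?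
  else (cs[i]? == cs[j]?) && palSpec cs (i+1) (j-1)
termination_by j - i
decreasing_by omega

lemma palSpec_eq_reverse (cs : List Char) :
    ∀ (d i k : Nat), k - i ≤ d → i ≤ k → k < cs.length →
    palSpec cs i k
      = ((cs.drop i).take (k+1-i) == ((cs.drop i).take (k+1-i)).reverse) := by
  intro d
  induction d with
  | zero =>
    intro i k hd hik hk
    have hki : k = i := by omega
    subst hki
    have hsub : (cs.drop k).take 1 = [cs[k]] := by
      exact List.take_one_drop_eq_of_lt_length hk
    rw [show k+1-k = 1 by omega, hsub, palSpec]
    simp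
  | succ d ih =>
    intro i k hd hik hk
    by_cases h0 : k = i
    · subst h0
      have hsub : (cs.drop k).take 1 = [cs[k]] := by
        exact List.take_one_drop_eq_of_lt_length hk
      rw [show k+1-k = 1 by omega, hsub, palSpec]
      simp
    · by_cases h1 : k = i + 1
      · subst h1
        rw [List.drop_eq_getElem_cons (show i < cs.length by omega),
            show i+1+1-i = 2 by omega]
        rw [List.drop_eq_getElem_cons (show i+1 < cs.length by omega)]
        rw [palSpec]
        rw [dif_neg (by omega), dif_pos (by omega)]
        rw [List.getElem?_eq_getElem (show i < cs.length by omega),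
            List.getElem?_eq_getElem (show i+1 < cs.length by omega)]
        apply Bool.eq_iff_iff.mpr
        simp only [List.take_succ_cons, List.take_zero, List.reverse_cons,
          List.reverse_nil, List.nil_append, List.cons_append, beq_iff_eq,
          Option.some.injEq, List.cons.injEq, and_true]
        constructor
        · intro h; exact ⟨h, h.symm⟩
        · intro h; exact h.1
      · -- k - i ≥ 2
        have hi : i < cs.length := by omega
        have hi1 : i + 1 < cs.length := by omega
        rw [palSpec, dif_neg (by omega), dif_neg (by omega)]
        rw [ih (i+1) (k-1) (by omega) (by omega) (by omega)]
        have e1 : (k-1)+1-(i+1) = k-i-1 := by omega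
        rw [e1]
        set inner := (cs.drop (i+1)).take (k-i-1) with hinner
        -- decompose the outer slice
        rw [List.drop_eq_getElem_cons hi, show k+1-i = (k-i-1)+1+1 by omega]
        rw [List.take_succ_cons]
        have e2 : (cs.drop (i+1)).take ((k-i-1)+1) = inner ++ [cs[k]] := by
          rw [List.take_add_one, hinner]
          congr 1
          rw [List.getElem?_drop, show i+1+(k-i-1) = k by omega,
              List.getElem?_eq_getElem hk]
          rfl
        rw [e2]
        rw [List.getElem?_eq_getElem hi, List.getElem?_eq_getElem hk]
        apply Bool.eq_iff_iff.mpr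
        simp only [Bool.and_eq_true, beq_iff_eq, Option.some.injEq,
          List.reverse_cons, List.reverse_append, List.reverse_nil,
          List.nil_append, List.cons_append, List.cons.injEq]
        constructor
        · rintro ⟨hab, hpal⟩
          refine ⟨hab, ?_⟩
          rw [← hpal, ← hab]
        · rintro ⟨hab, happ⟩
          refine ⟨hab, ?_⟩
          have := List.append_inj_left' happ (by simp)
          exact this

lemma foldl_setpred {α : Type} (C : Int → Bool) (f : Int → α) :
    ∀ (d : Nat) (a b : Int) (r : List α), 1 ≤ a → (b - a).toNat ≤ d →
    ∀ (k : Nat),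
      ((PySem.List.pyRange a b 1).foldl
        (fun r j => if C j then pySet r (j-1) (f j) else r) r)[k]? =
      if a ≤ (k:Int)+1 ∧ (k:Int)+1 < b ∧ C ((k:Int)+1) = true
      then r[k]?.map (fun _ => f ((k:Int)+1)) else r[k]? := by
  intro d
  induction d with
  | zero =>
    intro a b r ha hd k
    rw [PySem.List.pyRange_one_eq_nil (by omega)]
    rw [if_neg (by rintro ⟨h1, h2, _⟩; omega)]
    rfl
  | succ d ih =>
    intro a b r ha hd k
    by_cases hab : b ≤ a
    · rw [PySem.List.pyRange_one_eq_nil hab]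
      rw [if_neg (by rintro ⟨h1, h2, _⟩; omega)]
      rfl
    · rw [PySem.List.pyRange_one_cons (by omega), List.foldl_cons]
      have hset : ∀ v, (pySet r (a-1) v)[k]? =
          if (k:Int) = a - 1 then r[k]?.map (fun _ => v) else r[k]? := by
        intro v
        simp only [pySet, if_neg (show ¬ (a-1 < 0) by omega)]
        rw [List.getElem?_set]
        by_cases hk : (k:Int) = a - 1
        · have he : (a-1).toNat = k := by omega
          rw [if_pos he, if_pos hk, he]
          by_cases hl : k < r.length
          · rw [if_pos hl, List.getElem?_eq_getElem hl]; rfl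
          · rw [if_neg hl, List.getElem?_eq_none (by omega)]; rfl
        · rw [if_neg (show ¬ ((a-1).toNat = k) by omega), if_neg hk]
      have hstep : (if C a = true then pySet r (a-1) (f a) else r)[k]? =
          if (k:Int) = a - 1 ∧ C a = true then r[k]?.map (fun _ => f a) else r[k]? := by
        by_cases hC : C a = true
        · rw [if_pos hC, hset (f a)]
          by_cases hk : (k:Int) = a-1
          · rw [if_pos hk, if_pos ⟨hk, hC⟩]
          · rw [if_neg hk, if_neg (by tauto)]
        · rw [if_neg hC, if_neg (by tauto)]
      rw [ih (a+1) b _ (by omega) (by omega) k, hstep]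
      by_cases hka : (k:Int) = a - 1
      · have ha' : ((k:Int)+1) = a := by omega
        rw [ha']
        rw [if_neg (by rintro ⟨h1, _, _⟩; omega)]
        by_cases hC : C a = true
        · rw [if_pos ⟨hka, hC⟩, if_pos ⟨by omega, by omega, hC⟩]
        · rw [if_neg (by tauto), if_neg (by tauto)]
      · simp only [if_neg (show ¬ ((k:Int) = a - 1 ∧ C a = true) from fun h => hka h.1)]
        have hiff : (a+1 ≤ (k:Int)+1 ∧ (k:Int)+1 < b ∧ C ((k:Int)+1) = true) ↔
            (a ≤ (k:Int)+1 ∧ (k:Int)+1 < b ∧ C ((k:Int)+1) = true) :=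
          ⟨fun ⟨h1,h2,h3⟩ => ⟨by omega, h2, h3⟩, fun ⟨h1,h2,h3⟩ => ⟨by omega, h2, h3⟩⟩
        simp only [hiff]

lemma foldl_setrow (g : Int → List Int → List Int) :
    ∀ (d : Nat) (a b : Int) (m : List (List Int)), 0 ≤ a → (b - a).toNat ≤ d →
    ∀ (k : Nat),
      ((PySem.List.pyRange a b 1).foldl
        (fun m i => pySet m i (g i (PySem.List.pyGetD m i []))) m)[k]? =
      if a ≤ (k:Int) ∧ (k:Int) < b then m[k]?.map (g (k:Int)) else m[k]? := by
  intro d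
  induction d with
  | zero =>
    intro a b m ha hd k
    rw [PySem.List.pyRange_one_eq_nil (by omega)]
    rw [if_neg (by rintro ⟨h1, h2⟩; omega)]
    rfl
  | succ d ih =>
    intro a b m ha hd k
    by_cases hab : b ≤ a
    · rw [PySem.List.pyRange_one_eq_nil hab]
      rw [if_neg (by rintro ⟨h1, h2⟩; omega)]
      rfl
    · rw [PySem.List.pyRange_one_cons (by omega), List.foldl_cons]
      have hstep : (pySet m a (g a (PySem.List.pyGetD m a [])))[k]? =
          if (k:Int) = a then m[k]?.map (g a) else m[k]? := by
        simp only [pySet, if_neg (show ¬ (a < 0) by omega)]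
        rw [List.getElem?_set]
        by_cases hk : (k:Int) = a
        · rw [if_pos (show a.toNat = k by omega), if_pos hk, show a.toNat = k by omega]
          by_cases hl : k < m.length
          · rw [if_pos hl, List.getElem?_eq_getElem hl]
            have : PySem.List.pyGetD m a [] = m[k] := by
              rw [show a = ((k:Nat):Int) by omega]
              simp [PySem.List.pyGetD_of_nonneg, List.getElem?_eq_getElem hl]
            rw [this]; rfl
          · rw [if_neg hl, List.getElem?_eq_none (by omega)]; rfl
        · rw [if_neg (show ¬ (a.toNat = k) by omega), if_neg hk]
      rw [ih (a+1) b _ (by omega) (by omega) k, hstep]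
      by_cases hka : (k:Int) = a
      · rw [if_neg (by rintro ⟨h1, _⟩; omega), if_pos hka,
          if_pos ⟨by omega, by omega⟩, hka]
      · simp only [if_neg hka]
        have hiff : (a+1 ≤ (k:Int) ∧ (k:Int) < b) ↔ (a ≤ (k:Int) ∧ (k:Int) < b) :=
          ⟨fun ⟨h1,h2⟩ => ⟨by omega, h2⟩, fun ⟨h1,h2⟩ => ⟨by omega, h2⟩⟩
        simp only [hiff]

lemma pySet_nonneg {α : Type} (xs : List α) (i : Int) (hi : 0 ≤ i) (v : α) :
    pySet xs i v = xs.set i.toNat v := by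
  simp [pySet, show ¬ i < 0 by omega]

lemma pySet_pySet {α : Type} (m : List α) (i : Int) (hi : 0 ≤ i) (r r' : α) :
    pySet (pySet m i r) i r' = pySet m i r' := by
  simp [pySet_nonneg _ _ hi, List.set_set]

lemma pyGetD_pySet_self {α : Type} (m : List α) (i : Int) (hi : 0 ≤ i) (r d : α) :
    PySem.List.pyGetD (pySet m i r) i d = if i.toNat < m.length then r else d := by
  rw [pySet_nonneg _ _ hi, PySem.List.pyGetD_of_nonneg _ _ hi]
  by_cases h : i.toNat < m.length
  · rw [if_pos h, List.getD_eq_getElem?_getD, List.getElem?_set_self h]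
    rfl
  · rw [if_neg h, List.getD_eq_getElem?_getD, List.getElem?_eq_none (by simp; omega)]
    rfl

lemma pySet_pyGetD_self {α : Type} (m : List α) (i : Int) (hi : 0 ≤ i) (d : α) :
    pySet m i (PySem.List.pyGetD m i d) = m := by
  rw [pySet_nonneg _ _ hi, PySem.List.pyGetD_of_nonneg _ _ hi]
  by_cases h : i.toNat < m.length
  · rw [List.getD_eq_getElem?_getD, List.getElem?_eq_getElem h]
    simp
  · rw [List.set_eq_of_length_le (by omega)]

lemma inner_comm {α : Type} (i : Int) (hi : 0 ≤ i) (C : Int → Bool) (f : Int → α) :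
    ∀ (js : List Int) (m : List (List α)),
      js.foldl (fun m j => if C j then
          pySet m i (pySet (PySem.List.pyGetD m i []) (j-1) (f j)) else m) m
        = pySet m i (js.foldl (fun r j => if C j then pySet r (j-1) (f j) else r)
            (PySem.List.pyGetD m i [])) := by
  intro js
  induction js with
  | nil =>
    intro m
    simp [pySet_pyGetD_self m i hi]
  | cons j js ih =>
    intro m
    simp only [List.foldl_cons]
    by_cases hC : C j = true
    · rw [if_pos hC, if_pos hC, ih]
      rw [pyGetD_pySet_self _ _ hi, pySet_pySet _ _ hi]
      by_cases h : i.toNat < m.length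
      · rw [if_pos h]
      · rw [if_neg h]
        have hget : PySem.List.pyGetD m i ([] : List α) = [] := by
          rw [PySem.List.pyGetD_of_nonneg _ _ hi, List.getD_eq_getElem?_getD,
            List.getElem?_eq_none (by omega)]
          rfl
        rw [hget]
        simp [pySet]
    · rw [if_neg hC, if_neg hC, ih]

def targetRowSpec (cs : List Char) (i : Nat) : List Int :=
  (List.range cs.length).map (fun k =>
    if i < cs.length/2 ∧ i ≤ k ∧ palSpec cs i k = true then ((k:Int) - (i:Int) + 1) else 0)

def lpsTarget (cs : List Char) : List (List Int) :=
  (List.range cs.length).map (targetRowSpec cs)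

lemma lps2_eq_target (s : String) : lps2 s = lpsTarget s.toList := by
  have hlen : PySem.Chars.len s.toList = ((s.toList.length : Int)) := by simp
  have hflo : PySem.Int.floordiv ((s.toList.length : Int)) 2
      = (((s.toList.length/2 : Nat)) : Int) := by
    simp [PySem.Int.floordiv, Int.fdiv_eq_ediv]
  simp only [lps2, hlen, hflo]
  set cs := s.toList with hcs
  set N := cs.length with hN
  set H := N/2 with hH
  set Cf : Int → Int → Bool := fun i j =>
    (PySem.List.slice cs (some i) (some j) ==
      (PySem.List.slice? (PySem.List.slice cs (some i) (some j)) none none (-1)).getD []) with hCdef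
  set fv : Int → Int → Int := fun i j =>
    ((PySem.Chars.len (PySem.List.slice cs (some i) (some j)) : Int)) with hfdef
  set zr : List Int := (PySem.List.pyRange 0 (N:Int) 1).map (fun _ => (0:Int)) with hzr
  have hzrget : ∀ t : Nat, zr[t]? = if t < N then some (0:Int) else none := by
    intro t
    rw [hzr, PySem.List.pyRange_zero_natCast]
    by_cases ht : t < N
    · rw [List.getElem?_eq_getElem (by simpa using ht), if_pos ht]
      simp
    · rw [List.getElem?_eq_none (by simpa using ht), if_neg ht]
  have hzrlen : zr.length = N := by simp [hzr, PySem.List.pyRange_zero_natCast]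
  -- the inner loop result on the zero row
  have hrow : ∀ k : Nat, k < H →
      (PySem.List.pyRange ((k:Int)+1) ((N:Int)+1) 1).foldl
        (fun r j => if Cf (k:Int) j then pySet r (j-1) (fv (k:Int) j) else r) zr
        = targetRowSpec cs k := by
    intro k hk
    have hkN : k < N := by omega
    apply List.ext_getElem?
    intro t
    rw [foldl_setpred (Cf (k:Int)) (fv (k:Int)) (N+1) ((k:Int)+1) ((N:Int)+1) zr
      (by omega) (by omega) t]
    have htarget : (targetRowSpec cs k)[t]? =
        if t < N then some (if k < H ∧ k ≤ t ∧ palSpec cs k t = true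
          then ((t:Int) - (k:Int) + 1) else 0) else none := by
      unfold targetRowSpec
      rw [← hN, ← hH]
      by_cases ht : t < N
      · rw [List.getElem?_eq_getElem (by simpa using ht), if_pos ht]
        simp
      · rw [List.getElem?_eq_none (by simpa using ht), if_neg ht]
    rw [htarget, hzrget]
    by_cases ht : t < N
    · rw [if_pos ht, if_pos ht]
      simp only [Option.map_some]
      by_cases hkt : k ≤ t
      · have hcast : ((t:Int)+1) = (((t+1 : Nat)):Int) := by omega
        have hCt : Cf (k:Int) ((t:Int)+1) = palSpec cs k t := by
          rw [hCdef]
          simp only [hcast, PySem.List.slice_natCast,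
            PySem.List.slice?_none_none_neg_one, Option.getD_some]
          exact (palSpec_eq_reverse cs t k t (by omega) hkt (by omega)).symm
        have hft : fv (k:Int) ((t:Int)+1) = (t:Int) - (k:Int) + 1 := by
          rw [hfdef]
          simp only [hcast, PySem.List.slice_natCast]
          have hl : ((cs.drop k).take (t+1-k)).length = t+1-k := by
            simp only [List.length_take, List.length_drop]
            omega
          simp only [PySem.Chars.len_eq, hl]
          push_cast
          omega
        by_cases hp : palSpec cs k t = true
        · have hc3 : ((k:Int)+1 ≤ (t:Int)+1) ∧ ((t:Int)+1 < (N:Int)+1) ∧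
              (Cf (k:Int) ((t:Int)+1) = true) :=
            ⟨by omega, by omega, by rw [hCt]; exact hp⟩
          rw [if_pos hc3, if_pos ⟨hk, hkt, hp⟩, hft]
        · have hc3 : ¬ (((k:Int)+1 ≤ (t:Int)+1) ∧ ((t:Int)+1 < (N:Int)+1) ∧
              (Cf (k:Int) ((t:Int)+1) = true)) := by
            rintro ⟨-, -, hc⟩; rw [hCt] at hc; exact hp hc
          have hc4 : ¬ (k < H ∧ k ≤ t ∧ palSpec cs k t = true) := by
            rintro ⟨-, -, hc⟩; exact hp hc
          rw [if_neg hc3, if_neg hc4]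
      · have hc3 : ¬ (((k:Int)+1 ≤ (t:Int)+1) ∧ ((t:Int)+1 < (N:Int)+1) ∧
            (Cf (k:Int) ((t:Int)+1) = true)) := by
          rintro ⟨h1, -, -⟩; omega
        have hc4 : ¬ (k < H ∧ k ≤ t ∧ palSpec cs k t = true) := by
          rintro ⟨-, h1, -⟩; omega
        rw [if_neg hc3, if_neg hc4]
    · rw [if_neg ht, if_neg ht]
      have hc3 : ¬ (((k:Int)+1 ≤ (t:Int)+1) ∧ ((t:Int)+1 < (N:Int)+1) ∧
          (Cf (k:Int) ((t:Int)+1) = true)) := by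
        rintro ⟨-, h1, -⟩; omega
      rw [if_neg hc3]
  -- commute the inner loop out of the matrix
  rw [PySem.List.foldl_congr_mem _ _
    (fun m i => pySet m i
      ((PySem.List.pyRange (i+1) ((N:Int)+1) 1).foldl
        (fun r j => if Cf i j then pySet r (j-1) (fv i j) else r)
        (PySem.List.pyGetD m i []))) _
    (by
      intro m i hi
      have h0 : 0 ≤ i := by
        have := PySem.List.mem_pyRange_one.mp hi
        omega
      exact inner_comm i h0 (Cf i) (fv i) _ m)]
  -- now evaluate the outer loop entrywise
  apply List.ext_getElem?
  intro k
  rw [foldl_setrow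
    (fun i r => (PySem.List.pyRange (i+1) ((N:Int)+1) 1).foldl
      (fun r j => if Cf i j then pySet r (j-1) (fv i j) else r) r)
    H 0 ((H:Int)) _ (by omega) (by omega) k]
  have hm0 : ∀ k : Nat,
      ((PySem.List.pyRange 0 ((N:Int)) 1).map
        (fun _ => zr))[k]? = if k < N then some zr else none := by
    intro k
    rw [PySem.List.pyRange_zero_natCast]
    by_cases hkN : k < N
    · rw [List.getElem?_eq_getElem (by simpa using hkN)]
      simp [hkN]
    · rw [List.getElem?_eq_none (by simpa using hkN)]
      simp [hkN]
  have htg : ∀ k : Nat, (lpsTarget cs)[k]? =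
      if k < N then some (targetRowSpec cs k) else none := by
    intro k
    unfold lpsTarget
    by_cases hkN : k < N
    · rw [List.getElem?_eq_getElem (by simpa [hN] using hkN), if_pos hkN]
      simp
    · rw [List.getElem?_eq_none (by simpa [hN] using hkN), if_neg hkN]
  rw [hm0, htg]
  by_cases hkH : k < H
  · have hkN : k < N := by omega
    rw [if_pos ⟨by omega, by omega⟩, if_pos hkN, if_pos hkN]
    simp only [Option.map_some]
    congr 1
    exact hrow k hkH
  · rw [if_neg (by rintro ⟨-, h1⟩; omega)]
    by_cases hkN : k < N
    · rw [if_pos hkN, if_pos hkN]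
      congr 1
      unfold targetRowSpec
      rw [hzr, PySem.List.pyRange_zero_natCast, List.map_map]
      apply List.map_congr_left
      intro t ht
      simp only [Function.comp]
      rw [if_neg (by rintro ⟨h1, -, -⟩; omega)]
    · rw [if_neg hkN, if_neg hkN]

def palRowB (cs : List Char) (t : Nat) : List Bool :=
  (PySem.List.pyRange 0 (cs.length:Int) 1).map
    (fun j => if (t:Int) ≤ j then palSpec cs t j.toNat else false)

lemma altLoop (cs : List Char) : ∀ (t : Nat), t ≤ cs.length →
    (List.foldl
      (fun (st : List Bool × List (List Int)) i =>
        (List.map (fun j => if i ≤ j then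
              PySem.List.pyGet? cs i == PySem.List.pyGet? cs j &&
                (decide (j - i < 2) || PySem.List.pyGetD st.1 (j - 1) false)
            else false) (PySem.List.pyRange 0 (cs.length:Int)),
         (if i < ((cs.length / 2 : Nat) : Int) then
            List.map (fun j => if PySem.List.pyGetD
                  (List.map (fun j => if i ≤ j then
                      PySem.List.pyGet? cs i == PySem.List.pyGet? cs j &&
                        (decide (j - i < 2) || PySem.List.pyGetD st.1 (j - 1) false)
                    else false) (PySem.List.pyRange 0 (cs.length:Int))) j false = true
                then j - i + 1 else 0) (PySem.List.pyRange 0 (cs.length:Int))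
          else List.map (fun _ => (0:Int)) (PySem.List.pyRange 0 (cs.length:Int))) :: st.2))
      (palRowB cs t, ((List.range cs.length).drop t).map (targetRowSpec cs))
      (PySem.List.pyRange ((t:Int) - 1) (-1) (-1)))
    = (palRowB cs 0, (List.range cs.length).map (targetRowSpec cs)) := by
  intro t
  induction t with
  | zero =>
    intro _
    rw [PySem.List.pyRange_neg_one_eq_nil (by omega)]
    simp
  | succ t ih =>
    intro hle
    have htN : t < cs.length := by omega
    rw [show ((t+1 : Nat):Int) - 1 = (t:Int) by omega]
    rw [PySem.List.pyRange_neg_one_cons (by omega), List.foldl_cons]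
    have hcur : (List.map (fun j => if (t:Int) ≤ j then
          PySem.List.pyGet? cs (t:Int) == PySem.List.pyGet? cs j &&
            (decide (j - (t:Int) < 2) || PySem.List.pyGetD (palRowB cs (t+1)) (j - 1) false)
        else false) (PySem.List.pyRange 0 (cs.length:Int))) = palRowB cs t := by
      unfold palRowB
      apply List.map_congr_left
      intro j hj
      have hjb := PySem.List.mem_pyRange_one.mp hj
      by_cases htj : (t:Int) ≤ j
      · rw [if_pos htj, if_pos htj]
        have hj' : j = ((j.toNat : Nat) : Int) := by omega
        rw [hj']
        set jn := j.toNat with hjn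
        have hjnN : jn < cs.length := by omega
        have htjn : t ≤ jn := by omega
        rw [PySem.List.pyGet?_natCast, PySem.List.pyGet?_natCast, Int.toNat_natCast]
        by_cases h2 : jn - t < 2
        · rw [decide_eq_true (show ((jn:Int)) - (t:Int) < 2 by omega),
            Bool.true_or, Bool.and_true]
          conv_rhs => rw [palSpec]
          rw [dif_neg (by omega), dif_pos h2]
        · rw [decide_eq_false (show ¬ (((jn:Int)) - (t:Int) < 2) by omega),
            Bool.false_or]
          rw [show ((jn:Int)) - 1 = (((jn - 1 : Nat)) : Int) by omega]
          rw [PySem.List.pyGetD_map_pyRange_of_nonneg _ _ _ _ (by omega) (by omega)]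
          rw [if_pos (show (((t+1 : Nat)):Int) ≤ (((jn - 1 : Nat)):Int) by omega)]
          rw [Int.toNat_natCast]
          conv_rhs => rw [palSpec]
          rw [dif_neg (show ¬ (jn < t) by omega), dif_neg (show ¬ (jn - t < 2) by omega)]
      · rw [if_neg htj, if_neg htj]
    rw [hcur]
    have hrowB : (if (t:Int) < ((cs.length / 2 : Nat) : Int) then
          List.map (fun j => if PySem.List.pyGetD (palRowB cs t) j false = true
              then j - (t:Int) + 1 else 0) (PySem.List.pyRange 0 (cs.length:Int))
          else List.map (fun _ => (0:Int)) (PySem.List.pyRange 0 (cs.length:Int)))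
        = targetRowSpec cs t := by
      unfold targetRowSpec
      by_cases hH : t < cs.length / 2
      · rw [if_pos (by exact_mod_cast hH)]
        rw [PySem.List.pyRange_zero_natCast, List.map_map]
        apply List.map_congr_left
        intro k hk
        have hkN : k < cs.length := List.mem_range.mp hk
        simp only [Function.comp]
        unfold palRowB
        rw [PySem.List.pyGetD_map_pyRange_of_nonneg _ _ _ _ (by omega) (by omega)]
        rw [Int.toNat_natCast]
        by_cases htk : t ≤ k
        · rw [if_pos (show (t:Int) ≤ (k:Int) by omega)]
          by_cases hp : palSpec cs t k = true
          · rw [if_pos hp, if_pos ⟨hH, htk, hp⟩]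
          · rw [if_neg (by simpa using hp), if_neg (by rintro ⟨-, -, hc⟩; exact hp hc)]
        · rw [if_neg (show ¬ ((t:Int) ≤ (k:Int)) by omega)]
          rw [if_neg (by simp), if_neg (by rintro ⟨-, hc, -⟩; exact htk hc)]
      · rw [if_neg (show ¬ ((t:Int) < ((cs.length / 2 : Nat) : Int)) by exact_mod_cast hH)]
        rw [PySem.List.pyRange_zero_natCast, List.map_map]
        apply List.map_congr_left
        intro k hk
        simp only [Function.comp]
        rw [if_neg (by rintro ⟨hc, -, -⟩; exact hH hc)]
    rw [hrowB]
    have hcons : targetRowSpec cs t ::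
        ((List.range cs.length).drop (t+1)).map (targetRowSpec cs)
        = ((List.range cs.length).drop t).map (targetRowSpec cs) := by
      rw [List.drop_eq_getElem_cons (show t < (List.range cs.length).length by simpa),
        List.map_cons, List.getElem_range]
    rw [hcons]
    exact ih (by omega)

lemma lps2_alt_eq_target (s : String) : lps2_alt s = lpsTarget s.toList := by
  have hlen : PySem.Chars.len s.toList = ((s.toList.length : Int)) := by simp
  have hflo : PySem.Int.floordiv ((s.toList.length : Int)) 2
      = (((s.toList.length/2 : Nat)) : Int) := by
    simp [PySem.Int.floordiv, Int.fdiv_eq_ediv]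
  simp only [lps2_alt, hlen, hflo]
  have hinit1 : (List.map (fun _ => false)
      (PySem.List.pyRange 0 (s.toList.length:Int) 1)) = palRowB s.toList s.toList.length := by
    unfold palRowB
    apply List.map_congr_left
    intro j hj
    have hjb := PySem.List.mem_pyRange_one.mp hj
    rw [if_neg (by omega)]
  have hinit2 : ([] : List (List Int))
      = ((List.range s.toList.length).drop s.toList.length).map (targetRowSpec s.toList) := by
    simp
  rw [hinit1, hinit2]
  rw [show ((s.toList.length : Int)) - 1 = ((s.toList.length : Nat) : Int) - 1 from rfl]
  rw [altLoop s.toList s.toList.length le_rfl]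
  rfl

-- ===== VERDICT (by name: the statement is the Claim_ definition above) =====
theorem lps2_spec : Claim_equal_lps2 := by
  intro s _
  unfold Spec_lps2
  rw [lps2_eq_target, lps2_alt_eq_target]
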